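-- pv_equiv track=rewrite | github.com/MichaelVered/ResolveLight | learning_agent/exception_parser.py | _extract_exception_raw_data
-- ===== SOURCE A (Python) =====
-- def _extract_exception_raw_data(block: str, exception_id: str) -> str:
--     """Extract only the raw data for a specific exception from a block that may contain multiple exceptions."""
--     lines = block.strip().split('\n')
--     exception_lines = []
--     in_exception = False
--
--     for line in lines:
--         if line.startswith("EXCEPTION_ID:") and exception_id in line:
--             in_exception = True
--             exception_lines = [line]
--         elif in_exception:
--             if line.startswith("EXCEPTION_ID:") and exception_id not in line:
--                 # This is a different exception, stop collecting
--                 break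
--             elif line.strip():  # Only add non-empty lines
--                 exception_lines.append(line)
--
--     return '\n'.join(exception_lines) if exception_lines else block.strip()
-- ===== SOURCE B (Python) =====
-- def _extract_exception_raw_data(block: str, exception_id: str) -> str:
--     """Extract only the raw data for a specific exception from a block that may contain multiple exceptions."""
--     text = block.strip()
--     lines = text.split('\n')
--
--     def mine(l):
--         return l.startswith("EXCEPTION_ID:") and exception_id in l
--
--     k = next((i for i, l in enumerate(lines) if mine(l)), None)
--     if k is None:
--         return text
--     # the segment ends at the next header that belongs to a different exception
--     end = next((i for i in range(k + 1, len(lines))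
--                 if lines[i].startswith("EXCEPTION_ID:") and exception_id not in lines[i]),
--                len(lines))
--     # a repeated header for the same exception restarts its data: start at the last one
--     start = max(i for i in range(k, end) if mine(lines[i]))
--     return '\n'.join(l for l in lines[start:end] if l.strip())
-- ===== Notes on version B (the rewrite author's own statement) =====
-- stated objective: alternative
-- what changed: Replaces A's single-pass boolean-flag state machine (with accumulator resets and a break) by an index computation: find the first matching header, the boundary at the next foreign header, and the last matching header before the boundary, then join the non-empty lines of that one slice.
import Mathlib
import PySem

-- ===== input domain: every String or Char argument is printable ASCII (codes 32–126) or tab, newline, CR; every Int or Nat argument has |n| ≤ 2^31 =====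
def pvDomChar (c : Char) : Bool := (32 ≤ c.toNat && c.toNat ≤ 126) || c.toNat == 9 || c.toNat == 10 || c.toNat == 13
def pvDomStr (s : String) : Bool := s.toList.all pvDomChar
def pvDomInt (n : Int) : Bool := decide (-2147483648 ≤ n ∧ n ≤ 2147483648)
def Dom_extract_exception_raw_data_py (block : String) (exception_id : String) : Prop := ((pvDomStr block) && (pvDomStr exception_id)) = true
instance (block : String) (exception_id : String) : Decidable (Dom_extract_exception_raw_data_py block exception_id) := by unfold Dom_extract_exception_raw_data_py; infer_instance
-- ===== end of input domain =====

-- B replaces A's boolean-flag state machine by an index computation: first matching header,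
-- boundary at the next foreign header, last matching header before the boundary, then one
-- slice-filter-join; objective: alternative decomposition, same cost.

-- ===== PORT A =====
-- the for-loop of A: state = (exception_lines, in_exception); 'break' returns the accumulator
def pvLoopA (exception_id : String) : List String → List String → Bool → List String
  | [], acc, _ => acc
  | l :: ls, acc, inExc =>
    if PySem.Str.startswith l "EXCEPTION_ID:" && PySem.Str.isIn exception_id l then
      pvLoopA exception_id ls [l] true
    else if inExc then
      if PySem.Str.startswith l "EXCEPTION_ID:" && !PySem.Str.isIn exception_id l then
        acc  -- break
      else if PySem.Str.strip l != "" then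
        pvLoopA exception_id ls (acc ++ [l]) true
      else
        pvLoopA exception_id ls acc true
    else
      pvLoopA exception_id ls acc false

def extract_exception_raw_data_py (block : String) (exception_id : String) : String :=
  let lines := (PySem.Str.split? (PySem.Str.strip block) "\n").getD []
  let r := pvLoopA exception_id lines [] false
  if r ≠ [] then PySem.Str.join "\n" r else PySem.Str.strip block

-- ===== PORT B =====
def pvMine (exception_id : String) (l : String) : Bool :=
  PySem.Str.startswith l "EXCEPTION_ID:" && PySem.Str.isIn exception_id l

-- next((i for i, l in enumerate(lines) if mine(l)), None)
def pvFirstMine (exception_id : String) : List String → Nat → Option Nat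
  | [], _ => none
  | l :: ls, i => if pvMine exception_id l then some i else pvFirstMine exception_id ls (i + 1)

-- next((i for i in range(k+1, len(lines)) if foreign(lines[i])), len(lines)):
-- ported as a scan over lines[k+1:] carrying the running index i (exact: the loop reads
-- exactly lines[i] for i = k+1, …, len(lines)-1 in order)
def pvBoundary (exception_id : String) : List String → Nat → Nat
  | [], i => i
  | l :: ls, i =>
    if PySem.Str.startswith l "EXCEPTION_ID:" && !PySem.Str.isIn exception_id l then i
    else pvBoundary exception_id ls (i + 1)

-- max(i for i in range(k, end) if mine(lines[i])): ported as a fold over lines[k:end]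
-- keeping the best index so far (exact: the generator is nonempty — it contains k — and
-- its indices are strictly increasing, so Python's max is the last selected index)
def pvLastMine (exception_id : String) : List String → Nat → Nat → Nat
  | [], _, best => best
  | l :: ls, i, best =>
    pvLastMine exception_id ls (i + 1) (if pvMine exception_id l then i else best)

def extract_exception_raw_data_py_alt (block : String) (exception_id : String) : String :=
  let text := PySem.Str.strip block
  let lines := (PySem.Str.split? text "\n").getD []
  match pvFirstMine exception_id lines 0 with
  | none => text
  | some k =>
    let e := pvBoundary exception_id (lines.drop (k + 1)) (k + 1)
    let start := pvLastMine exception_id ((lines.drop k).take (e - k)) k k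
    -- lines[start:end] with 0 ≤ start ≤ e ≤ len(lines): exact as drop/take
    PySem.Str.join "\n" (((lines.drop start).take (e - start)).filter (fun l => PySem.Str.strip l != ""))

-- ===== PRECONDITION & SPEC =====
def Spec_extract_exception_raw_data_py (block : String) (exception_id : String) (out : String) : Prop := out = extract_exception_raw_data_py_alt block exception_id
instance (block : String) (exception_id : String) (out : String) : Decidable (Spec_extract_exception_raw_data_py block exception_id out) := by unfold Spec_extract_exception_raw_data_py; infer_instance

-- ===== CLAIM (what is proved, stated in full; the proofs are below) =====
def Claim_equal_extract_exception_raw_data_py : Prop := ∀ (block : String) (exception_id : String), Dom_extract_exception_raw_data_py block exception_id → Spec_extract_exception_raw_data_py block exception_id (extract_exception_raw_data_py block exception_id)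

-- ===== LEMMAS AND PROOFS =====

-- proof-side intermediaries (used only below)
def pvDropToMine (exception_id : String) : List String → List String
  | [] => []
  | l :: ls => if pvMine exception_id l then l :: ls else pvDropToMine exception_id ls

def pvTakeSeg (exception_id : String) : List String → List String
  | [] => []
  | l :: ls =>
    if PySem.Str.startswith l "EXCEPTION_ID:" && !PySem.Str.isIn exception_id l then []
    else l :: pvTakeSeg exception_id ls

theorem pvDropToMine_length_le (exception_id : String) (xs : List String) :
    (pvDropToMine exception_id xs).length ≤ xs.length := by
  induction xs with
  | nil => simp [pvDropToMine]
  | cons l ls ih =>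
    simp only [pvDropToMine]
    split
    · simp
    · exact Nat.le_succ_of_le ih

def pvLastSeg (exception_id : String) : List String → List String
  | [] => []
  | m :: T =>
    if pvDropToMine exception_id T = [] then m :: T
    else pvLastSeg exception_id (pvDropToMine exception_id T)
  termination_by xs => xs.length
  decreasing_by
    exact Nat.lt_succ_of_le (pvDropToMine_length_le exception_id T)

-- index of the last pvMine line, if any
def pvLastIdx? (exception_id : String) : List String → Option Nat
  | [] => none
  | l :: ls =>
    match pvLastIdx? exception_id ls with
    | some j => some (j + 1)
    | none => if pvMine exception_id l then some 0 else none

-- a line starting with "EXCEPTION_ID:" does not strip to the empty string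
theorem pv_header_nonempty (l : String) (h : PySem.Str.startswith l "EXCEPTION_ID:" = true) :
    (PySem.Str.strip l != "") = true := by
  rw [PySem.Str.startswith_eq] at h
  obtain ⟨t, ht⟩ := (PySem.Chars.startswith_iff _ _).mp h
  have hne : (PySem.Str.strip l).toList ≠ [] := by
    rw [PySem.Str.toList_strip, ← ht]
    show PySem.Chars.strip ('E' :: ("XCEPTION_ID:".toList ++ t)) ≠ []
    intro hcon
    simp only [PySem.Chars.strip, PySem.Chars.lstrip, PySem.Chars.rstrip,
      List.dropWhile_cons_of_neg (show ¬ PySem.Chars.isspace 'E' = true by decide)] at hcon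
    have h2 : List.dropWhile PySem.Chars.isspace ('E' :: ("XCEPTION_ID:".toList ++ t)).reverse = [] := by
      simpa using congrArg List.reverse hcon
    have h3 := (List.dropWhile_eq_nil_iff.mp h2) 'E' (by simp)
    exact absurd h3 (by decide)
  simp only [bne_iff_ne, ne_eq]
  intro hc
  exact hne (by rw [hc]; rfl)

theorem pvMine_nonempty (exception_id l : String) (h : pvMine exception_id l = true) :
    (PySem.Str.strip l != "") = true := by
  rw [pvMine, Bool.and_eq_true] at h
  exact pv_header_nonempty l h.1

-- the head of a nonempty pvDropToMine result is a matching header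
theorem pvDropToMine_head (exception_id : String) (xs : List String) (m : String) (rest : List String)
    (h : pvDropToMine exception_id xs = m :: rest) : pvMine exception_id m = true := by
  induction xs with
  | nil => simp [pvDropToMine] at h
  | cons l ls ih =>
    rw [pvDropToMine] at h
    split at h
    · next hc => cases h; exact hc
    · exact ih h

-- decomposition of a nonempty pvDropToMine result
theorem pvDropToMine_decomp (exception_id : String) (xs : List String) (m : String) (rest : List String)
    (h : pvDropToMine exception_id xs = m :: rest) :
    ∃ P, xs = P ++ m :: rest ∧ ∀ l ∈ P, pvMine exception_id l = false := by
  induction xs with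
  | nil => simp [pvDropToMine] at h
  | cons l ls ih =>
    rw [pvDropToMine] at h
    split at h
    · cases h; exact ⟨[], by simp⟩
    · next hc =>
      obtain ⟨P, hP, hall⟩ := ih h
      exact ⟨l :: P, by simp [hP], by
        intro x hx
        rcases List.mem_cons.mp hx with h1 | h1
        · subst h1; exact eq_false_of_ne_true hc
        · exact hall x h1⟩

theorem pvDropToMine_nil (exception_id : String) (xs : List String)
    (h : pvDropToMine exception_id xs = []) : ∀ l ∈ xs, pvMine exception_id l = false := by
  induction xs with
  | nil => simp
  | cons l ls ih =>
    rw [pvDropToMine] at h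
    split at h
    · simp at h
    · next hc =>
      intro x hx
      rcases List.mem_cons.mp hx with h1 | h1
      · subst h1; exact eq_false_of_ne_true hc
      · exact ih h x h1

-- pvFirstMine on a decomposed list
theorem pvFirstMine_none (exception_id : String) (xs : List String) (i : Nat)
    (h : ∀ l ∈ xs, pvMine exception_id l = false) : pvFirstMine exception_id xs i = none := by
  induction xs generalizing i with
  | nil => rfl
  | cons l ls ih =>
    rw [pvFirstMine, if_neg (by simp [h l (by simp)])]
    exact ih _ (fun x hx => h x (List.mem_cons_of_mem _ hx))

theorem pvFirstMine_decomp (exception_id : String) (P : List String) (m : String) (R : List String) (i : Nat)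
    (hall : ∀ l ∈ P, pvMine exception_id l = false) (hm : pvMine exception_id m = true) :
    pvFirstMine exception_id (P ++ m :: R) i = some (i + P.length) := by
  induction P generalizing i with
  | nil => simp [pvFirstMine, hm]
  | cons l ls ih =>
    rw [List.cons_append, pvFirstMine, if_neg (by simp [hall l (by simp)])]
    rw [ih (i + 1) (fun x hx => hall x (List.mem_cons_of_mem _ hx))]
    simp only [List.length_cons]
    congr 1
    omega

-- pvBoundary returns start index plus the pvTakeSeg length
theorem pvBoundary_eq (exception_id : String) (xs : List String) (i : Nat) :
    pvBoundary exception_id xs i = i + (pvTakeSeg exception_id xs).length := by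
  induction xs generalizing i with
  | nil => simp [pvBoundary, pvTakeSeg]
  | cons l ls ih =>
    rw [pvBoundary, pvTakeSeg]
    split
    · simp
    · rw [ih (i + 1)]
      simp only [List.length_cons]
      omega

-- pvTakeSeg is a prefix
theorem pvTakeSeg_prefix (exception_id : String) (xs : List String) :
    pvTakeSeg exception_id xs <+: xs := by
  induction xs with
  | nil => simp [pvTakeSeg]
  | cons l ls ih =>
    rw [pvTakeSeg]
    split
    · simp
    · exact (List.prefix_cons_inj l).mpr ih

-- pvLastMine in terms of pvLastIdx?
theorem pvLastMine_eq (exception_id : String) (xs : List String) (i best : Nat) :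
    pvLastMine exception_id xs i best =
      match pvLastIdx? exception_id xs with
      | some j => i + j
      | none => best := by
  induction xs generalizing i best with
  | nil => rfl
  | cons l ls ih =>
    rw [pvLastMine, ih, pvLastIdx?]
    cases h : pvLastIdx? exception_id ls with
    | some j =>
      show i + 1 + j = i + (j + 1)
      omega
    | none =>
      by_cases hm : pvMine exception_id l = true
      · simp [hm]
      · simp [eq_false_of_ne_true hm]

theorem pvLastIdx?_append (exception_id : String) (xs ys : List String) :
    pvLastIdx? exception_id (xs ++ ys) =
      match pvLastIdx? exception_id ys with
      | some j => some (xs.length + j)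
      | none =>
        match pvLastIdx? exception_id xs with
        | some j => some j
        | none => none := by
  induction xs with
  | nil => cases h : pvLastIdx? exception_id ys <;> simp [pvLastIdx?, h]
  | cons l ls ih =>
    rw [List.cons_append, pvLastIdx?, ih, pvLastIdx?]
    cases h : pvLastIdx? exception_id ys with
    | some j => simp only [List.length_cons]; congr 1; omega
    | none =>
      cases h2 : pvLastIdx? exception_id ls with
      | some j2 => simp
      | none => by_cases hm : pvMine exception_id l = true <;> simp [hm]

theorem pvLastIdx?_lt (exception_id : String) (xs : List String) (j : Nat)
    (h : pvLastIdx? exception_id xs = some j) : j < xs.length := by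
  induction xs generalizing j with
  | nil => simp [pvLastIdx?] at h
  | cons l ls ih =>
    rw [pvLastIdx?] at h
    cases h2 : pvLastIdx? exception_id ls with
    | some j2 => rw [h2] at h; cases h; simpa using Nat.succ_lt_succ (ih _ h2)
    | none =>
      rw [h2] at h
      by_cases hm : pvMine exception_id l = true
      · rw [if_pos hm] at h; cases h; simp
      · rw [if_neg hm] at h; cases h

theorem pvLastIdx?_none (exception_id : String) (xs : List String)
    (h : ∀ l ∈ xs, pvMine exception_id l = false) : pvLastIdx? exception_id xs = none := by
  induction xs with
  | nil => rfl
  | cons l ls ih =>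
    rw [pvLastIdx?, ih (fun x hx => h x (List.mem_cons_of_mem _ hx))]
    simp [h l (by simp)]

-- pvLastSeg drops up to the last matching header
theorem pvLastSeg_eq_drop (exception_id : String) :
    ∀ (T : List String) (m : String), pvMine exception_id m = true →
    pvLastSeg exception_id (m :: T) = (m :: T).drop ((pvLastIdx? exception_id (m :: T)).getD 0) := by
  intro T
  induction hn : T.length using Nat.strong_induction_on generalizing T with
  | _ n ih =>
    intro m hm
    rw [pvLastSeg]
    by_cases hr : pvDropToMine exception_id T = []
    · rw [if_pos hr]
      have hnone := pvLastIdx?_none exception_id T (pvDropToMine_nil exception_id T hr)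
      rw [pvLastIdx?, hnone]
      simp [hm]
    · rw [if_neg hr]
      obtain ⟨m', T', hT'⟩ := List.exists_cons_of_ne_nil hr
      have hm' := pvDropToMine_head exception_id T m' T' hT'
      obtain ⟨P, hP, hPall⟩ := pvDropToMine_decomp exception_id T m' T' hT'
      have hlen : T'.length < n := by
        have := pvDropToMine_length_le exception_id T
        rw [hT'] at this
        simp only [List.length_cons] at this
        omega
      rw [hT', ih T'.length hlen T' rfl m' hm']
      -- rewrite the right-hand side using the decomposition m :: T = (m :: P) ++ m' :: T'
      have hsplit : m :: T = (m :: P) ++ m' :: T' := by simp [hP]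
      rw [hsplit, pvLastIdx?_append]
      have hsome : ∃ j, pvLastIdx? exception_id (m' :: T') = some j := by
        cases h2 : pvLastIdx? exception_id (m' :: T') with
        | some j => exact ⟨j, rfl⟩
        | none =>
          exfalso
          have := pvLastIdx?_none
          rw [pvLastIdx?] at h2
          cases h3 : pvLastIdx? exception_id T' with
          | some j2 => rw [h3] at h2; cases h2
          | none => rw [h3, if_pos hm'] at h2; cases h2
      obtain ⟨j, hj⟩ := hsome
      rw [hj]
      show (m' :: T').drop j = ((m :: P) ++ m' :: T').drop ((m :: P).length + j)
      rw [List.drop_append, List.drop_eq_nil_of_le (Nat.le_add_right _ _),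
        Nat.add_sub_cancel_left, List.nil_append]

-- A's loop in the not-yet-collecting phase skips to the first matching header
theorem pvLoopA_false (exception_id : String) (ls : List String) :
    pvLoopA exception_id ls [] false =
      (match pvDropToMine exception_id ls with
       | [] => []
       | m :: rest => pvLoopA exception_id rest [m] true) := by
  induction ls with
  | nil => simp [pvLoopA, pvDropToMine]
  | cons l ls ih =>
    simp only [pvLoopA, pvDropToMine, pvMine]
    by_cases hc : (PySem.Str.startswith l "EXCEPTION_ID:" && PySem.Str.isIn exception_id l) = true
    · rw [if_pos hc, if_pos hc]
    · rw [if_neg hc, if_neg hc, if_neg (by simp)]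
      exact ih

-- characterization of A's loop in the collecting phase
theorem pvLoopA_true (exception_id : String) (ls : List String) (acc : List String) :
    pvLoopA exception_id ls acc true =
      (if pvDropToMine exception_id (pvTakeSeg exception_id ls) = []
       then acc ++ (pvTakeSeg exception_id ls).filter (fun l => PySem.Str.strip l != "")
       else (pvLastSeg exception_id (pvDropToMine exception_id (pvTakeSeg exception_id ls))).filter
              (fun l => PySem.Str.strip l != "")) := by
  induction ls generalizing acc with
  | nil => simp [pvLoopA, pvTakeSeg, pvDropToMine]
  | cons l ls ih =>
    by_cases hS : PySem.Str.startswith l "EXCEPTION_ID:" = true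
    · by_cases hI : PySem.Str.isIn exception_id l = true
      · -- matching header: A restarts its accumulator
        have hc1 : (PySem.Str.startswith l "EXCEPTION_ID:" && PySem.Str.isIn exception_id l) = true := by
          rw [hS, hI]; rfl
        have hne := pv_header_nonempty l hS
        simp only [pvLoopA, pvTakeSeg]
        rw [if_pos hc1, if_neg (show ¬(PySem.Str.startswith l "EXCEPTION_ID:" && !PySem.Str.isIn exception_id l) = true by rw [hI]; simp)]
        simp only [pvDropToMine, pvMine]
        rw [if_pos hc1, if_neg (List.cons_ne_nil _ _), pvLastSeg, ih [l]]
        by_cases hR : pvDropToMine exception_id (pvTakeSeg exception_id ls) = []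
        · rw [if_pos hR, if_pos hR, List.filter_cons]
          simp [hne]
        · rw [if_neg hR, if_neg hR]
      · -- foreign header: A breaks, B's segment ends here
        have hI' : PySem.Str.isIn exception_id l = false := eq_false_of_ne_true hI
        have hbd : (PySem.Str.startswith l "EXCEPTION_ID:" && !PySem.Str.isIn exception_id l) = true := by
          rw [hS, hI']; rfl
        simp only [pvLoopA, pvTakeSeg]
        rw [if_neg (show ¬(PySem.Str.startswith l "EXCEPTION_ID:" && PySem.Str.isIn exception_id l) = true by rw [hI']; simp),
            if_pos trivial, if_pos hbd, if_pos hbd]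
        simp [pvDropToMine]
    · -- ordinary line: both keep it iff it strips nonempty
      have hS' : PySem.Str.startswith l "EXCEPTION_ID:" = false := eq_false_of_ne_true hS
      simp only [pvLoopA, pvTakeSeg]
      rw [if_neg (show ¬(PySem.Str.startswith l "EXCEPTION_ID:" && PySem.Str.isIn exception_id l) = true by rw [hS']; simp),
          if_pos trivial,
          if_neg (show ¬(PySem.Str.startswith l "EXCEPTION_ID:" && !PySem.Str.isIn exception_id l) = true by rw [hS']; simp),
          if_neg (show ¬(PySem.Str.startswith l "EXCEPTION_ID:" && !PySem.Str.isIn exception_id l) = true by rw [hS']; simp)]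
      simp only [pvDropToMine, pvMine]
      rw [if_neg (show ¬(PySem.Str.startswith l "EXCEPTION_ID:" && PySem.Str.isIn exception_id l) = true by rw [hS']; simp)]
      by_cases hstrip : (PySem.Str.strip l != "") = true
      · rw [if_pos hstrip, ih (acc ++ [l])]
        by_cases hR : pvDropToMine exception_id (pvTakeSeg exception_id ls) = []
        · rw [if_pos hR, if_pos hR, List.filter_cons]
          simp [hstrip]
        · rw [if_neg hR, if_neg hR]
      · rw [if_neg hstrip, ih acc]
        by_cases hR : pvDropToMine exception_id (pvTakeSeg exception_id ls) = []
        · rw [if_pos hR, if_pos hR, List.filter_cons]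
          simp [eq_false_of_ne_true hstrip]
        · rw [if_neg hR, if_neg hR]

-- A's collecting loop equals filter of pvLastSeg of the capped segment
theorem pvLoopA_true_lastSeg (exception_id : String) (m : String) (rest : List String)
    (hm : pvMine exception_id m = true) :
    pvLoopA exception_id rest [m] true =
      (pvLastSeg exception_id (m :: pvTakeSeg exception_id rest)).filter
        (fun l => PySem.Str.strip l != "") := by
  rw [pvLoopA_true, pvLastSeg]
  by_cases hR : pvDropToMine exception_id (pvTakeSeg exception_id rest) = []
  · rw [if_pos hR, if_pos hR, List.filter_cons]
    simp [pvMine_nonempty exception_id m hm]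
  · rw [if_neg hR, if_neg hR]

-- the head of pvLastSeg of a matching-headed list is a matching header
theorem pvLastSeg_head (exception_id : String) :
    ∀ (xs : List String) (m : String), pvMine exception_id m = true →
    ∃ m' ys, pvLastSeg exception_id (m :: xs) = m' :: ys ∧ pvMine exception_id m' = true := by
  intro xs
  induction hn : xs.length using Nat.strong_induction_on generalizing xs with
  | _ n ih =>
    intro m hm
    rw [pvLastSeg]
    by_cases hr : pvDropToMine exception_id xs = []
    · exact ⟨m, xs, by simp [hr], hm⟩
    · rw [if_neg hr]
      obtain ⟨m'', ys'', hys⟩ := List.exists_cons_of_ne_nil hr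
      have hm2 := pvDropToMine_head exception_id xs m'' ys'' hys
      have hlen : ys''.length < n := by
        have h1 := pvDropToMine_length_le exception_id xs
        rw [hys] at h1
        simp only [List.length_cons] at h1
        omega
      rw [hys]
      exact ih ys''.length hlen ys'' rfl m'' hm2

-- ===== VERDICT (by name: the statement is the Claim_ definition above) =====
theorem extract_exception_raw_data_py_spec : Claim_equal_extract_exception_raw_data_py := by
  intro block exception_id _
  unfold Spec_extract_exception_raw_data_py
  unfold extract_exception_raw_data_py extract_exception_raw_data_py_alt
  simp only []
  set lines := (PySem.Str.split? (PySem.Str.strip block) "\n").getD [] with hlines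
  rw [pvLoopA_false]
  cases hd : pvDropToMine exception_id lines with
  | nil =>
    rw [pvFirstMine_none exception_id lines 0 (pvDropToMine_nil exception_id lines hd)]
    simp
  | cons m rest =>
    have hm := pvDropToMine_head exception_id lines m rest hd
    obtain ⟨P, hP, hPall⟩ := pvDropToMine_decomp exception_id lines m rest hd
    -- B's first index
    rw [show pvFirstMine exception_id lines 0 = some P.length by
      rw [hP, pvFirstMine_decomp exception_id P m rest 0 hPall hm, Nat.zero_add]]
    simp only []
    set t := pvTakeSeg exception_id rest with ht
    -- drops of lines
    have hdropk : lines.drop P.length = m :: rest := by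
      rw [hP, List.drop_append_of_le_length (le_refl _)]
      simp
    have hdropk1 : lines.drop (P.length + 1) = rest := by
      rw [hP, show P ++ m :: rest = (P ++ [m]) ++ rest by simp,
        show P.length + 1 = (P ++ [m]).length by simp]
      exact List.drop_left
    -- boundary
    rw [hdropk1, pvBoundary_eq]
    -- the segment handed to pvLastMine is m :: t
    have htake : rest.take t.length = t :=
      (List.prefix_iff_eq_take.mp (pvTakeSeg_prefix exception_id rest)).symm
    have hseg : (lines.drop P.length).take (P.length + 1 + t.length - P.length) = m :: t := by
      rw [hdropk]
      rw [show P.length + 1 + t.length - P.length = t.length + 1 by omega]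
      simp [htake]
    rw [hseg, pvLastMine_eq]
    -- last index inside m :: t
    have hsomej : ∃ j, pvLastIdx? exception_id (m :: t) = some j := by
      cases h2 : pvLastIdx? exception_id (m :: t) with
      | some j => exact ⟨j, rfl⟩
      | none =>
        rw [pvLastIdx?] at h2
        cases h3 : pvLastIdx? exception_id t with
        | some j2 => rw [h3] at h2; cases h2
        | none => rw [h3, if_pos hm] at h2; cases h2
    obtain ⟨j, hj⟩ := hsomej
    have hjlt : j < t.length + 1 := by
      have := pvLastIdx?_lt exception_id (m :: t) j hj
      simpa using this
    rw [hj]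
    simp only []
    -- B's slice equals (m :: t).drop j
    have hdropstart : lines.drop (P.length + j) = (m :: rest).drop j := by
      rw [← hdropk, List.drop_drop]
    have hslice : (lines.drop (P.length + j)).take (P.length + 1 + t.length - (P.length + j)) =
        (m :: t).drop j := by
      rw [hdropstart, show P.length + 1 + t.length - (P.length + j) = t.length + 1 - j by omega]
      have : m :: t = (m :: rest).take (t.length + 1) := by simp [htake]
      rw [this, List.drop_take]
    rw [hslice]
    -- A's loop result
    rw [pvLoopA_true_lastSeg exception_id m rest hm, ← ht,
      pvLastSeg_eq_drop exception_id t m hm, hj]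
    simp only [Option.getD_some]
    -- the result list is nonempty, so A's if takes the join branch
    obtain ⟨m', ys, hls, hm'⟩ := pvLastSeg_head exception_id t m hm
    rw [pvLastSeg_eq_drop exception_id t m hm, hj] at hls
    simp only [Option.getD_some] at hls
    rw [hls, List.filter_cons]
    simp [pvMine_nonempty exception_id m' hm']
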